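-- pv_equiv track=rewrite | github.com/Mapet13/Studia | ćwiczenia 5/04.py | compare_LA_to_LG
-- ===== SOURCE A (Python) =====
-- def nwd(x, y):
--     z = 0
--     while (y != 0):
--         z = x % y
--         x = y
--         y = z
--     return x
--
-- def get_common_denominator(x, y): # nww
--     return x* y // nwd(x, y)
--
-- def try_to_reduce_fraction(l, m):
--     x = nwd(l, m)
--     return (l // x, m // x)
--
-- def add(a, b):
--     l1, m1 = a
--     l2, m2 = b
--     m = get_common_denominator(m1, m2)
--     l = l1 * (m // m1) + l2 * (m // m2)
--     return try_to_reduce_fraction(l, m)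
--
-- def subtract(a, b):
--     l, m = b
--     return add(a, (-l, m))
--
-- def multiply(a, b):
--     l1, m1 = a
--     l2, m2 = b
--     x = l1 * l2
--     y = m1 * m2
--     return try_to_reduce_fraction(x, y)
--
-- def divide(a, b):
--     l, m = b
--     return multiply(a, (m, l))
--
-- def compare_LA_to_LG(t):
--     n = len(t)
--
--     LG = 0
--     LA = 0
--
--     q = 0
--     if t[0][0] != 0:
--         q = divide(t[1], t[0])
--     current_g_count = 1
--     r = subtract(t[1], t[0])
--     current_a_count = 1
--     for i in range(2, n):
--         #geometric
--         if t[i-1][0] != 0: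
--             nq = divide(t[i], t[i-1])
--         elif t[i][0] != 0:
--             nq = None
--         else:
--             nq = 0
--         if nq == q:
--             if current_g_count == 1:
--                 LG += 1
--             current_g_count += 1
--         else:
--             current_g_count = 1
--             q = nq
--
--         #aritmetic
--         nr = subtract(t[i], t[i-1])
--         if nr == r:
--             if current_a_count == 1:
--                 LA += 1
--             current_a_count += 1
--         else:
--             current_a_count = 1
--             r = nr
--
--     if LA > LG:
--         return 1
--     elif LA < LG:
--         return -1
--     return 0
-- ===== SOURCE B (Python) =====
-- # B: build the ratio/difference sequences once, then count maximal runs of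
-- # equal consecutive values (length >= 2) per sequence, instead of A's fused
-- # stateful index loop. Fraction helpers kept raw-tuple-based like A.
--
-- def nwd(x, y):
--     z = 0
--     while (y != 0):
--         z = x % y
--         x = y
--         y = z
--     return x
--
-- def get_common_denominator(x, y):
--     return x * y // nwd(x, y)
--
-- def try_to_reduce_fraction(l, m):
--     x = nwd(l, m)
--     return (l // x, m // x)
--
-- def add(a, b):
--     l1, m1 = a
--     l2, m2 = b
--     m = get_common_denominator(m1, m2)
--     l = l1 * (m // m1) + l2 * (m // m2)
--     return try_to_reduce_fraction(l, m)
--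
-- def subtract(a, b):
--     l, m = b
--     return add(a, (-l, m))
--
-- def multiply(a, b):
--     l1, m1 = a
--     l2, m2 = b
--     x = l1 * l2
--     y = m1 * m2
--     return try_to_reduce_fraction(x, y)
--
-- def divide(a, b):
--     l, m = b
--     return multiply(a, (m, l))
--
-- def count_runs(xs):
--     # number of maximal runs of equal consecutive values of length >= 2
--     total = 0
--     run = 1
--     for prev, cur in zip(xs, xs[1:]):
--         if cur == prev:
--             run += 1
--         else:
--             if run > 1:
--                 total += 1
--             run = 1
--     return total + (1 if run > 1 else 0)
--
-- def compare_LA_to_LG(t):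
--     n = len(t)
--     qs = [divide(t[1], t[0]) if t[0][0] != 0 else 0]
--     rs = [subtract(t[1], t[0])]
--     for i in range(2, n):
--         if t[i - 1][0] != 0:
--             qs.append(divide(t[i], t[i - 1]))
--         elif t[i][0] != 0:
--             qs.append(None)
--         else:
--             qs.append(0)
--         rs.append(subtract(t[i], t[i - 1]))
--     LG = count_runs(qs)
--     LA = count_runs(rs)
--     return (LA > LG) - (LA < LG)
-- ===== Notes on version B (the rewrite author's own statement) =====
-- stated objective: alternative
-- what changed: B builds the ratio sequence and the difference sequence in one pass and then counts maximal runs of equal consecutive values (length >= 2) per sequence with a run-end counter, instead of A's single fused index loop that interleaves both run counters with the fraction arithmetic; the raw-tuple fraction helpers are kept byte-for-byte.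
import Mathlib
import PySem

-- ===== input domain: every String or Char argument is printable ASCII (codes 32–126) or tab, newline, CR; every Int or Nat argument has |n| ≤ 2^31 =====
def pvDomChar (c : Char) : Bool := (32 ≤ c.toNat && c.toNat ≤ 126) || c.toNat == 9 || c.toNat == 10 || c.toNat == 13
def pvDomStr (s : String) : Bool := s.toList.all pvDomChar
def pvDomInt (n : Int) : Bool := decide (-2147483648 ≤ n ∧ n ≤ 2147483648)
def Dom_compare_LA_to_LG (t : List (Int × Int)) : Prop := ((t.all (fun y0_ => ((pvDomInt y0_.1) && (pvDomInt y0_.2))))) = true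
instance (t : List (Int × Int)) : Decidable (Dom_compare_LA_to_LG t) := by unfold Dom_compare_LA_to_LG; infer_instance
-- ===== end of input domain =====

-- B builds the ratio/difference sequences once and counts maximal runs (length ≥ 2) per
-- sequence, instead of A's fused stateful index loop; objective: alternative decomposition.

-- ===== PORT A =====
-- fraction helpers, shared verbatim by A and B (Source B keeps them byte-for-byte)
theorem pv_mod_natAbs_lt (x y : Int) (h : y ≠ 0) :
    (PySem.Int.mod x y).natAbs < y.natAbs := by
  rcases lt_or_gt_of_ne h with hy | hy
  · have := PySem.Int.mod_neg_bounds x hy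
    omega
  · have h1 := PySem.Int.mod_nonneg x hy
    have h2 := PySem.Int.mod_lt x hy
    omega

def nwd (x y : Int) : Int :=
  if h : y = 0 then x
  else nwd y (PySem.Int.mod x y)
termination_by y.natAbs
decreasing_by exact pv_mod_natAbs_lt x y h

def get_common_denominator (x y : Int) : Int :=
  PySem.Int.floordiv (x * y) (nwd x y)

def try_to_reduce_fraction (l m : Int) : Int × Int :=
  let x := nwd l m
  (PySem.Int.floordiv l x, PySem.Int.floordiv m x)

def add (a b : Int × Int) : Int × Int :=
  let (l1, m1) := a
  let (l2, m2) := b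
  let m := get_common_denominator m1 m2
  let l := l1 * (PySem.Int.floordiv m m1) + l2 * (PySem.Int.floordiv m m2)
  try_to_reduce_fraction l m

def subtract (a b : Int × Int) : Int × Int :=
  let (l, m) := b
  add a (-l, m)

def multiply (a b : Int × Int) : Int × Int :=
  let (l1, m1) := a
  let (l2, m2) := b
  let x := l1 * l2
  let y := m1 * m2
  try_to_reduce_fraction x y

def divide (a b : Int × Int) : Int × Int :=
  let (l, m) := b
  multiply a (m, l)

-- Python's q / nq variable holds one of three kinds of values: the int 0, None, or a fraction
-- tuple; Python's == across these kinds is False, which DecidableEq on this type reproduces.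
inductive QVal where
  | pyzero : QVal
  | pynone : QVal
  | frac : Int → Int → QVal
deriving DecidableEq, Repr

def compare_LA_to_LG (t : List (Int × Int)) : Int :=
  let n : Int := PySem.List.len t
  let LG : Int := 0
  let LA : Int := 0
  let q : QVal :=
    if (PySem.List.pyGetD t 0 (0, 0)).1 ≠ 0 then
      let p := divide (PySem.List.pyGetD t 1 (0, 0)) (PySem.List.pyGetD t 0 (0, 0))
      QVal.frac p.1 p.2
    else QVal.pyzero
  let r : Int × Int := subtract (PySem.List.pyGetD t 1 (0, 0)) (PySem.List.pyGetD t 0 (0, 0))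
  let s :=
    (PySem.List.pyRange 2 n 1).foldl
      (fun (st : Int × Int × QVal × Int × (Int × Int) × Int) i =>
        let (LG, LA, q, cg, r, ca) := st
        let nq : QVal :=
          if (PySem.List.pyGetD t (i - 1) (0, 0)).1 ≠ 0 then
            let p := divide (PySem.List.pyGetD t i (0, 0)) (PySem.List.pyGetD t (i - 1) (0, 0))
            QVal.frac p.1 p.2
          else if (PySem.List.pyGetD t i (0, 0)).1 ≠ 0 then QVal.pynone
          else QVal.pyzero
        let (LG, cg, q) :=
          if nq = q then ((if cg = 1 then LG + 1 else LG), cg + 1, q)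
          else (LG, (1 : Int), nq)
        let nr := subtract (PySem.List.pyGetD t i (0, 0)) (PySem.List.pyGetD t (i - 1) (0, 0))
        let (LA, ca, r) :=
          if nr = r then ((if ca = 1 then LA + 1 else LA), ca + 1, r)
          else (LA, (1 : Int), nr)
        (LG, LA, q, cg, r, ca))
      (LG, LA, q, 1, r, 1)
  if s.2.1 > s.1 then 1 else if s.2.1 < s.1 then -1 else 0

-- ===== PORT B =====
def count_runs {α : Type} [DecidableEq α] (xs : List α) : Int :=
  let s :=
    (xs.zip (PySem.List.slice xs (some 1) none)).foldl
      (fun (s : Int × Int) pc =>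
        if pc.2 = pc.1 then (s.1, s.2 + 1)
        else ((if 1 < s.2 then s.1 + 1 else s.1), 1))
      (0, 1)
  s.1 + (if 1 < s.2 then 1 else 0)

def compare_LA_to_LG_alt (t : List (Int × Int)) : Int :=
  let n : Int := PySem.List.len t
  let qs : List QVal :=
    (if (PySem.List.pyGetD t 0 (0, 0)).1 ≠ 0 then
        let p := divide (PySem.List.pyGetD t 1 (0, 0)) (PySem.List.pyGetD t 0 (0, 0))
        QVal.frac p.1 p.2
      else QVal.pyzero) ::
      (PySem.List.pyRange 2 n 1).map (fun i =>
        if (PySem.List.pyGetD t (i - 1) (0, 0)).1 ≠ 0 then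
          let p := divide (PySem.List.pyGetD t i (0, 0)) (PySem.List.pyGetD t (i - 1) (0, 0))
          QVal.frac p.1 p.2
        else if (PySem.List.pyGetD t i (0, 0)).1 ≠ 0 then QVal.pynone
        else QVal.pyzero)
  let rs : List (Int × Int) :=
    subtract (PySem.List.pyGetD t 1 (0, 0)) (PySem.List.pyGetD t 0 (0, 0)) ::
      (PySem.List.pyRange 2 n 1).map (fun i =>
        subtract (PySem.List.pyGetD t i (0, 0)) (PySem.List.pyGetD t (i - 1) (0, 0)))
  let LG := count_runs qs
  let LA := count_runs rs
  (if LA > LG then 1 else 0) - (if LA < LG then 1 else 0)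

-- ===== PRECONDITION & SPEC =====
-- Pre_ excludes exactly the inputs where the Python A raises: IndexError when len(t) < 2,
-- ZeroDivisionError when some pair has denominator 0 (subtract/divide divide by it).
def Pre_compare_LA_to_LG (t : List (Int × Int)) : Prop :=
  2 ≤ t.length ∧ ∀ p ∈ t, p.2 ≠ 0
instance (t : List (Int × Int)) : Decidable (Pre_compare_LA_to_LG t) := by
  unfold Pre_compare_LA_to_LG; infer_instance

def pvWitness_compare_LA_to_LG : (List (Int × Int)) := [(1, 2), (3, 4), (2, 1)]

def Spec_compare_LA_to_LG (t : List (Int × Int)) (out : Int) : Prop := out = compare_LA_to_LG_alt t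
instance (t : List (Int × Int)) (out : Int) : Decidable (Spec_compare_LA_to_LG t out) := by
  unfold Spec_compare_LA_to_LG; infer_instance

-- ===== CLAIM (what is proved, stated in full; the proofs are below) =====
def Claim_equal_compare_LA_to_LG : Prop :=
  ∀ (t : List (Int × Int)), Dom_compare_LA_to_LG t → Pre_compare_LA_to_LG t →
    Spec_compare_LA_to_LG t (compare_LA_to_LG t)

-- ===== LEMMAS AND PROOFS =====

-- abstract "count runs of length >= 2, credited at the run's end" state machine
def runEnd {α : Type} [DecidableEq α] (p : α) (tot run : Int) : List α → Int
  | [] => tot + (if 1 < run then 1 else 0)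
  | x :: xs => if x = p then runEnd x tot (run + 1) xs
               else runEnd x (if 1 < run then tot + 1 else tot) 1 xs

-- the loop body of count_runs, named for the proofs
def crStep {α : Type} [DecidableEq α] (s : Int × Int) (pc : α × α) : Int × Int :=
  if pc.2 = pc.1 then (s.1, s.2 + 1)
  else ((if 1 < s.2 then s.1 + 1 else s.1), 1)

theorem crfold {α : Type} [DecidableEq α] (l : List α) :
    ∀ (h : α) (tot run : Int),
      (((h :: l).zip l).foldl crStep (tot, run)).1 +
        (if 1 < (((h :: l).zip l).foldl crStep (tot, run)).2 then 1 else 0) =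
      runEnd h tot run l := by
  induction l with
  | nil => intro h tot run; simp [runEnd]
  | cons x r ih =>
    intro h tot run
    simp only [List.zip_cons_cons, List.foldl_cons, runEnd]
    by_cases hx : x = h
    · subst hx
      simp only [crStep, if_pos rfl]
      exact ih x tot (run + 1)
    · simp only [crStep]
      rw [if_neg hx, if_neg hx]
      exact ih x _ 1

theorem count_runs_cons {α : Type} [DecidableEq α] (h : α) (l : List α) :
    count_runs (h :: l) = runEnd h 0 1 l := by
  unfold count_runs
  rw [PySem.List.slice_from_one]
  exact crfold l h 0 1

-- the loop body of A's fused loop, abstracted over the (ratio, difference) pair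
def stepAB {α β : Type} [DecidableEq α] [DecidableEq β]
    (st : Int × Int × α × Int × β × Int) (p : α × β) : Int × Int × α × Int × β × Int :=
  let (LG, LA, q, cg, r, ca) := st
  let (LG, cg, q) :=
    if p.1 = q then ((if cg = 1 then LG + 1 else LG), cg + 1, q)
    else (LG, (1 : Int), p.1)
  let (LA, ca, r) :=
    if p.2 = r then ((if ca = 1 then LA + 1 else LA), ca + 1, r)
    else (LA, (1 : Int), p.2)
  (LG, LA, q, cg, r, ca)

-- A's fused loop over the (ratio, difference) pairs computes the two run-end counters
theorem bigkey {α β : Type} [DecidableEq α] [DecidableEq β] (ps : List (α × β)) :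
    ∀ (LG LA : Int) (q : α) (cg : Int) (r : β) (ca totG runG totA runA : Int),
      1 ≤ cg → 1 ≤ runG → (cg = 1 ↔ runG = 1) → LG = totG + (if 1 < runG then 1 else 0) →
      1 ≤ ca → 1 ≤ runA → (ca = 1 ↔ runA = 1) → LA = totA + (if 1 < runA then 1 else 0) →
      (ps.foldl stepAB (LG, LA, q, cg, r, ca)).1 = runEnd q totG runG (ps.map Prod.fst) ∧
      (ps.foldl stepAB (LG, LA, q, cg, r, ca)).2.1 = runEnd r totA runA (ps.map Prod.snd) := by
  induction ps with
  | nil =>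
    intro LG LA q cg r ca totG runG totA runA _ _ _ hLG _ _ _ hLA
    simp only [List.foldl_nil, List.map_nil, runEnd]
    exact ⟨hLG, hLA⟩
  | cons p rest ih =>
    intro LG LA q cg r ca totG runG totA runA hcg hrg hig hLG hca hra hia hLA
    simp only [List.foldl_cons, List.map_cons, runEnd, stepAB]
    by_cases h1 : p.1 = q <;> by_cases h2 : p.2 = r <;> simp only [h1, h2, if_pos, if_neg,
      ite_true, ite_false, if_true, if_false, eq_self_iff_true, not_true, not_false_iff,
      reduceIte]
    · exact ih _ _ _ _ _ _ totG (runG + 1) totA (runA + 1)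
        (by omega) (by omega) (by omega) (by split_ifs at hLG ⊢ <;> omega)
        (by omega) (by omega) (by omega) (by split_ifs at hLA ⊢ <;> omega)
    · exact ih _ _ _ _ _ _ totG (runG + 1) (if 1 < runA then totA + 1 else totA) 1
        (by omega) (by omega) (by omega) (by split_ifs at hLG ⊢ <;> omega)
        (by omega) (by omega) (by omega) (by split_ifs at hLA ⊢ <;> omega)
    · exact ih _ _ _ _ _ _ (if 1 < runG then totG + 1 else totG) 1 totA (runA + 1)
        (by omega) (by omega) (by omega) (by split_ifs at hLG ⊢ <;> omega)
        (by omega) (by omega) (by omega) (by split_ifs at hLA ⊢ <;> omega)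
    · exact ih _ _ _ _ _ _ (if 1 < runG then totG + 1 else totG) 1
        (if 1 < runA then totA + 1 else totA) 1
        (by omega) (by omega) (by omega) (by split_ifs at hLG ⊢ <;> omega)
        (by omega) (by omega) (by omega) (by split_ifs at hLA ⊢ <;> omega)

-- proof-side names for the per-index ratio / difference values and the initial values
def nqOf (t : List (Int × Int)) (i : Int) : QVal :=
  if (PySem.List.pyGetD t (i - 1) (0, 0)).1 ≠ 0 then
    let p := divide (PySem.List.pyGetD t i (0, 0)) (PySem.List.pyGetD t (i - 1) (0, 0))
    QVal.frac p.1 p.2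
  else if (PySem.List.pyGetD t i (0, 0)).1 ≠ 0 then QVal.pynone
  else QVal.pyzero

def nrOf (t : List (Int × Int)) (i : Int) : Int × Int :=
  subtract (PySem.List.pyGetD t i (0, 0)) (PySem.List.pyGetD t (i - 1) (0, 0))

def q0Of (t : List (Int × Int)) : QVal :=
  if (PySem.List.pyGetD t 0 (0, 0)).1 ≠ 0 then
    let p := divide (PySem.List.pyGetD t 1 (0, 0)) (PySem.List.pyGetD t 0 (0, 0))
    QVal.frac p.1 p.2
  else QVal.pyzero

def r0Of (t : List (Int × Int)) : Int × Int :=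
  subtract (PySem.List.pyGetD t 1 (0, 0)) (PySem.List.pyGetD t 0 (0, 0))

def outOf (s : Int × Int × QVal × Int × (Int × Int) × Int) : Int :=
  if s.2.1 > s.1 then 1 else if s.2.1 < s.1 then -1 else 0

theorem A_eq (t : List (Int × Int)) :
    compare_LA_to_LG t =
      outOf (((PySem.List.pyRange 2 (PySem.List.len t) 1).map
          (fun i => (nqOf t i, nrOf t i))).foldl stepAB (0, 0, q0Of t, 1, r0Of t, 1)) := by
  rw [List.foldl_map]; rfl

theorem B_eq (t : List (Int × Int)) :
    compare_LA_to_LG_alt t =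
      (if count_runs (r0Of t :: (PySem.List.pyRange 2 (PySem.List.len t) 1).map (nrOf t)) >
          count_runs (q0Of t :: (PySem.List.pyRange 2 (PySem.List.len t) 1).map (nqOf t)) then 1
        else 0) -
      (if count_runs (r0Of t :: (PySem.List.pyRange 2 (PySem.List.len t) 1).map (nrOf t)) <
          count_runs (q0Of t :: (PySem.List.pyRange 2 (PySem.List.len t) 1).map (nqOf t)) then 1
        else 0) := rfl

-- ===== VERDICT (by name: the statement is the Claim_ definition above) =====
theorem compare_LA_to_LG_spec : Claim_equal_compare_LA_to_LG := by
  intro t _ _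
  show compare_LA_to_LG t = compare_LA_to_LG_alt t
  rw [A_eq t, B_eq t, count_runs_cons, count_runs_cons]
  obtain ⟨hg, ha⟩ := bigkey
    ((PySem.List.pyRange 2 (PySem.List.len t) 1).map (fun i => (nqOf t i, nrOf t i)))
    0 0 (q0Of t) 1 (r0Of t) 1 0 1 0 1
    (by omega) (by omega) (by omega) (by norm_num)
    (by omega) (by omega) (by omega) (by norm_num)
  simp only [List.map_map, Function.comp_def] at hg ha
  simp only [show (fun x => nqOf t x) = nqOf t from rfl,
    show (fun x => nrOf t x) = nrOf t from rfl] at hg ha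
  unfold outOf
  rw [hg, ha]
  split_ifs <;> omega
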